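-- pv_equiv track=rewrite | github.com/AnniePawl/Anna-Interview-Prep | CTI/replit_python_practice/numbers/bits.py | last_two
-- ===== SOURCE A (Python) =====
-- def last_two(num):
--   binary = []
--   while num > 0:
--     if num % 2 == 0:
--       binary.append(0)
--       num = num //2
--     else:
--       binary.append(1)
--       num = num //2
--
--   return " ".join(map(str, (binary[::-1])[-2:]))
-- ===== SOURCE B (Python) =====
-- def last_two(num):
--   if num <= 0:
--     return ""
--   bits = format(num, "b")
--   return " ".join(bits[-2:])
-- ===== Notes on version B (the rewrite author's own statement) =====
-- stated objective: idiomatic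
-- what changed: Replaces the divide-by-2 loop that collects bits into a list (then reverses, slices and joins) with the built-in binary string conversion format(num,'b') plus a [-2:] slice, joined with a space.
import Mathlib
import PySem

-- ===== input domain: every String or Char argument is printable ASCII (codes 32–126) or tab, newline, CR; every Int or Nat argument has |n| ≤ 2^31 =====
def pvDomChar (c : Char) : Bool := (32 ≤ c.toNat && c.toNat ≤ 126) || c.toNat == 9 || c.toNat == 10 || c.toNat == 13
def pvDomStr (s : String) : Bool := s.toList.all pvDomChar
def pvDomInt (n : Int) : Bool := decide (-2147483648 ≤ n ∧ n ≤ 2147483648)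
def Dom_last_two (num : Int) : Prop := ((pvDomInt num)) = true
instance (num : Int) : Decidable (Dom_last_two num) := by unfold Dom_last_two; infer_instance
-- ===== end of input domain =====

-- B replaces A's divide-by-2 bit-collecting loop (list, reverse, slice, join) with the
-- built-in binary string conversion format(num,'b') plus a [-2:] slice — more idiomatic.

-- ===== PORT A =====
-- the while-loop: binary.append(num % 2 bit); num //= 2, while num > 0
def last_two_loop (num : Int) (binary : List Int) : List Int :=
  if h : num > 0 then
    if PySem.Int.mod num 2 = 0 then
      last_two_loop (PySem.Int.floordiv num 2) (binary ++ [0])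
    else
      last_two_loop (PySem.Int.floordiv num 2) (binary ++ [1])
  else binary
termination_by num.toNat
decreasing_by
  all_goals
    rw [PySem.Int.floordiv_eq_ediv_of_pos (by omega)]
    omega

def last_two (num : Int) : String :=
  -- binary[::-1] is List.reverse (PySem.List.slice?_none_none_neg_one); [-2:] is PySem.List.slice
  PySem.Str.join " "
    ((PySem.List.slice (last_two_loop num []).reverse (some (-2)) none).map PySem.Int.toStr)

-- ===== PORT B =====
def last_two_alt (num : Int) : String :=
  if num ≤ 0 then ""
  else
    -- bits = format(num, "b") is PySem.Int.toBin; " ".join(bits[-2:]) joins its characters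
    PySem.Str.join " "
      ((PySem.List.slice (PySem.Int.toBin num).toList (some (-2)) none).map
        (fun c => String.ofList [c]))

-- ===== PRECONDITION & SPEC =====
def Spec_last_two (num : Int) (out : String) : Prop := out = last_two_alt num
instance (num : Int) (out : String) : Decidable (Spec_last_two num out) := by unfold Spec_last_two; infer_instance

-- ===== CLAIM (what is proved, stated in full; the proofs are below) =====
def Claim_equal_last_two : Prop := ∀ (num : Int), Dom_last_two num → Spec_last_two num (last_two num)

-- ===== LEMMAS AND PROOFS =====

-- the bits of n, least significant first, as A's loop collects them (on Nat)
def lsbInts (n : Nat) : List Int :=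
  if n = 0 then [] else ((n % 2 : Nat) : Int) :: lsbInts (n / 2)
termination_by n
decreasing_by exact Nat.div_lt_self (by omega) (by omega)

-- the binary digits of n, most significant first (what format(n,'b') prints for n > 0)
def bitsMSB (n : Nat) : List Char :=
  if n = 0 then [] else bitsMSB (n / 2) ++ [Nat.digitChar (n % 2)]
termination_by n
decreasing_by exact Nat.div_lt_self (by omega) (by omega)

lemma loop_spec (n : Nat) : ∀ acc : List Int,
    last_two_loop (n : Int) acc = acc ++ lsbInts n := by
  induction n using Nat.strong_induction_on with
  | _ n ih =>
    intro acc
    by_cases h0 : n = 0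
    · subst h0
      rw [last_two_loop, lsbInts]; simp
    · have hpos : (0:Int) < (n:Int) := by exact_mod_cast Nat.pos_of_ne_zero h0
      have hlt : n / 2 < n := Nat.div_lt_self (Nat.pos_of_ne_zero h0) (by omega)
      have hmod : PySem.Int.mod (n : Int) 2 = ((n % 2 : Nat) : Int) := by
        exact_mod_cast PySem.Int.mod_natCast n 2
      have hfd : PySem.Int.floordiv (n : Int) 2 = ((n / 2 : Nat) : Int) := by
        exact_mod_cast PySem.Int.floordiv_natCast n 2
      rw [last_two_loop, lsbInts, if_neg h0, dif_pos hpos, hmod, hfd]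
      by_cases hm : n % 2 = 0
      · have h2 : ((n % 2 : Nat) : Int) = 0 := by exact_mod_cast hm
        rw [if_pos h2, ih (n / 2) hlt]
        simp [h2]
      · have h2 : ((n % 2 : Nat) : Int) = 1 := by
          have : n % 2 = 1 := by omega
          exact_mod_cast this
        rw [if_neg (by rw [h2]; norm_num), ih (n / 2) hlt]
        simp [h2]

lemma lsbInts_mem (n : Nat) : ∀ x ∈ lsbInts n, x = 0 ∨ x = 1 := by
  induction n using Nat.strong_induction_on with
  | _ n ih =>
    intro x hx
    by_cases h0 : n = 0
    · subst h0; rw [lsbInts] at hx; simp at hx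
    · rw [lsbInts, if_neg h0] at hx
      rcases List.mem_cons.mp hx with h | h
      · rcases Nat.mod_two_eq_zero_or_one n with hm | hm <;> simp [h, hm]
      · exact ih (n / 2) (Nat.div_lt_self (Nat.pos_of_ne_zero h0) (by omega)) x h

lemma bitsMSB_eq (n : Nat) :
    bitsMSB n = (lsbInts n).reverse.map (fun i => Nat.digitChar i.toNat) := by
  induction n using Nat.strong_induction_on with
  | _ n ih =>
    by_cases h0 : n = 0
    · subst h0; rw [bitsMSB, lsbInts]; simp
    · rw [bitsMSB, lsbInts, if_neg h0, if_neg h0]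
      rw [ih (n / 2) (Nat.div_lt_self (Nat.pos_of_ne_zero h0) (by omega))]
      have h2 : ((n : Int) % 2).toNat = n % 2 := by omega
      simp [h2]

lemma toDigitsCore_eq (f : Nat) : ∀ (n : Nat) (acc : List Char), 0 < n → n < f →
    Nat.toDigitsCore 2 f n acc = bitsMSB n ++ acc := by
  induction f with
  | zero => intro n acc h1 h2; omega
  | succ f ih =>
    intro n acc h1 h2
    rw [Nat.toDigitsCore]
    by_cases hd : n / 2 = 0
    · have : n = 1 := by omega
      subst this
      simp [bitsMSB]
    · rw [if_neg hd]
      rw [ih (n / 2) _ (Nat.pos_of_ne_zero hd) (by omega)]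
      conv_rhs => rw [bitsMSB, if_neg (by omega)]
      simp

lemma toBinChars_pos (n : Nat) (h : 0 < n) :
    PySem.Int.toBinChars (n : Int) = bitsMSB n := by
  rw [PySem.Int.toBinChars]
  rw [if_neg (by omega)]
  simp only [Int.toNat_natCast]
  rw [Nat.toDigits, toDigitsCore_eq (n + 1) n [] h (by omega)]
  simp

-- ===== VERDICT (by name: the statement is the Claim_ definition above) =====
theorem last_two_spec : Claim_equal_last_two := by
  intro num _
  unfold Spec_last_two last_two last_two_alt
  by_cases h : num ≤ 0
  · rw [if_pos h, last_two_loop, dif_neg (show ¬ num > 0 by omega)]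
    decide
  · rw [if_neg h]
    have hn : num = ((num.toNat : Nat) : Int) := by omega
    have hpos : 0 < num.toNat := by omega
    rw [hn, loop_spec num.toNat [], List.nil_append,
        PySem.Int.toList_toBin, toBinChars_pos num.toNat hpos, bitsMSB_eq]
    set L : List Int := (lsbInts num.toNat).reverse with hL
    have hmemL : ∀ x ∈ L, x = 0 ∨ x = 1 := by
      intro x hx; exact lsbInts_mem num.toNat x (List.mem_reverse.mp hx)
    rw [PySem.List.slice_from_neg_ofNat L 2 (by omega),
        PySem.List.slice_from_neg_ofNat (L.map (fun i => Nat.digitChar i.toNat)) 2 (by omega)]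
    rw [List.length_map, ← List.map_drop, List.map_map]
    apply congrArg
    apply List.map_congr_left
    intro x hx
    rcases hmemL x (List.mem_of_mem_drop hx) with rfl | rfl <;> decide
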